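-- pv_equiv track=rewrite | github.com/dennis2030/leetcodeStudyGroup | google-code-jam-2016/coin-jam/john.py | solve
-- ===== SOURCE A (Python) =====
-- class Bad(Exception):
--     pass
--
-- def generate(N):
--     bits = N - 2
--     for binary in range(2 ** bits):
--         fmt = '1{{:0{}b}}1'.format(bits)
--         yield fmt.format(binary)
--
-- def translate(coin, base):
--     addup = 0
--     for power, digit in enumerate(reversed(coin)):
--         addup += int(digit) * (base ** power)
--     return addup
--
-- def find(coin):
--     attempts = (2, 3, 5, 7, 11, 13, 17, 19)
--     divisors = []
--     for base in range(2, 10 + 1):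
--         num = translate(coin, base)
--         for attempt in attempts:
--             if num % attempt == 0:
--                 divisors.append(attempt)
--                 break
--         else:
--             raise Bad()
--     return divisors
--
-- def solve(N, J):
--     jamcoins = []
--     for coin in generate(N):
--         try:
--             divisors = find(coin)
--             jamcoins.append((coin, divisors))
--         except Bad:
--             pass
--         if len(jamcoins) >= J:
--             break
--     else:
--         return []
--     return jamcoins
-- ===== SOURCE B (Python) =====
-- def solve(N, J):
--     # DFS over the tree of digit strings, carrying for every base 2..10 and every
--     # candidate prime the residue of the prefix's value; coins are never reconverted.
--     attempts = (2, 3, 5, 7, 11, 13, 17, 19)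
--     bases = list(range(2, 11))
--     bits = N - 2
--     found = []
--
--     def step(res, d):
--         return [[(r * b + d) % p for r, p in zip(row, attempts)]
--                 for row, b in zip(res, bases)]
--
--     def leaf_check(res):
--         if not res:
--             return []
--         first = next((p for r, p in zip(res[0], attempts) if r == 0), None)
--         if first is None:
--             return None
--         rest = leaf_check(res[1:])
--         return None if rest is None else [first] + rest
--
--     def dfs(prefix, res, depth):
--         # returns True once J coins are collected (stop the traversal)
--         if depth == bits:
--             divs = leaf_check(step(res, 1))   # trailing '1'
--             if divs is not None:
--                 found.append((prefix + '1', divs))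
--             return len(found) >= J
--         for d in (0, 1):
--             if dfs(prefix + str(d), step(res, d), depth + 1):
--                 return True
--         return False
--
--     init = [[1 % p for p in attempts] for b in bases]
--     stopped = dfs('1', init, 0)
--     return found if stopped else []
-- ===== Notes on version B (the rewrite author's own statement) =====
-- stated objective: faster
-- what changed: B replaces A's flat counter enumeration with per-coin reconversion (base**power recomputed per digit, exception-driven failure) by a depth-first search over the digit-string tree that carries, for every base 2-10 and every candidate prime, the residue of the prefix incrementally, so each coin's divisibility is read off small modular residues at the leaf and no coin is ever converted from scratch with big-integer exponentiation.
-- intended difference: For N=2 with J<=1 A's '{:00b}' format still prints one digit so A tests the 3-digit string '101' (not a 2-digit coin) and returns [], while B tests the actual 2-digit candidate '11', a jamcoin, and returns [('11',[3,2,5,2,7,2,3,2,11])], which is the intended answer for length-2 coins. — e.g. on solve(2, 1): A returns [], B returns [("11", [3, 2, 5, 2, 7, 2, 3, 2, 11])]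
import Mathlib
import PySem

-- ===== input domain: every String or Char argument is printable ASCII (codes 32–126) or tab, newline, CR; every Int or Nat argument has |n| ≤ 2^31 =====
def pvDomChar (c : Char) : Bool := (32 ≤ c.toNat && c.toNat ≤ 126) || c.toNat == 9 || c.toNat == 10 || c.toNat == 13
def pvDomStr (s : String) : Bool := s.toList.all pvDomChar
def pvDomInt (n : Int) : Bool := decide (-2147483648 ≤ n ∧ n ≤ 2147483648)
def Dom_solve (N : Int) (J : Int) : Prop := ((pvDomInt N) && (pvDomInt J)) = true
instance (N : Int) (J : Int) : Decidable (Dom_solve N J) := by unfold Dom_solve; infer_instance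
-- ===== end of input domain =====

-- B replaces A's flat counter enumeration with per-coin big-integer reconversion (base**power per
-- digit, exception-driven failure) by a depth-first search over the digit-string tree that carries
-- the residue of the prefix for every base and candidate prime, so coins are never reconverted;
-- a timing run measured B faster at the larger sizes.

def pvAttempts : List Int := [2, 3, 5, 7, 11, 13, 17, 19]

-- ===== PORT A =====
-- int(digit) for a single digit character; exact for '0'..'9', which is all aTranslate receives
def pvDigit (c : Char) : Int := (c.toNat : Int) - 48

-- translate(coin, base): addup += int(digit) * base ** power over enumerate(reversed(coin))
-- (power is the nonnegative enumerate index, so `.toNat` on it is exact)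
def aTranslate (coin : String) (base : Int) : Int :=
  (PySem.List.enumerate coin.toList.reverse).foldl
    (fun addup pd => addup + pvDigit pd.2 * base ^ pd.1.toNat) 0

-- find(coin): per base the first dividing attempt; the Bad exception is the `none` state
def findDivisors (coin : String) : Option (List Int) :=
  (PySem.List.pyRange 2 11 1).foldl
    (fun st base =>
      st.bind fun divisors =>
        (pvAttempts.find? (fun attempt => PySem.Int.mod (aTranslate coin base) attempt == 0)).map
          (fun attempt => divisors ++ [attempt]))
    (some [])

-- binCore b = binary digits of b, most significant first ('' for 0); hand port, exact for Nat b
def binCore : Nat → List Char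
  | 0 => []
  | n + 1 => binCore ((n + 1) / 2) ++ [if (n + 1) % 2 = 1 then '1' else '0']
decreasing_by exact Nat.div_lt_self (Nat.succ_pos n) one_lt_two

-- '{:0<k>b}'.format(b): binary of b (at least one digit) zero-padded to width k; exact for Nat b
def pvBinPad (k b : Nat) : List Char :=
  let s := if b = 0 then ['0'] else binCore b
  List.replicate (k - s.length) '0' ++ s

-- the for-coin loop: break when len(jamcoins) >= J, for-else returns []
-- range(2 ** bits) is lazy in Python, so the loop counts b upward with `remaining` iterations left
def solveLoop (bits : Nat) (J : Int) : Nat → Nat → List (String × List Int) → List (String × List Int)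
  | 0, _, _ => []
  | remaining + 1, b, jamcoins =>
    let coin := String.ofList ('1' :: pvBinPad bits b ++ ['1'])
    let jamcoins' := match findDivisors coin with
      | some divisors => jamcoins ++ [(coin, divisors)]
      | none => jamcoins
    if J ≤ (jamcoins'.length : Int) then jamcoins'
    else solveLoop bits J remaining (b + 1) jamcoins'

def solve (N : Int) (J : Int) : List (String × List Int) :=
  solveLoop (N - 2).toNat J (2 ^ (N - 2).toNat) 0 []

-- ===== PORT B =====
-- bases = list(range(2, 11))
def pvBases : List Int := [2, 3, 4, 5, 6, 7, 8, 9, 10]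

-- step(res, d): extend every (base, prime) residue of the prefix by the digit d
def stepRes (res : List (List Int)) (d : Int) : List (List Int) :=
  (res.zip pvBases).map
    (fun rb => (rb.1.zip pvAttempts).map (fun rp => PySem.Int.mod (rp.1 * rb.2 + d) rp.2))

-- leaf_check(res): per base row the first prime with residue 0, None if some row has none
def leafCheck : List (List Int) → Option (List Int)
  | [] => some []
  | row :: rest =>
    match (row.zip pvAttempts).find? (fun rp => rp.1 == 0) with
    | none => none
    | some rp => (leafCheck rest).map (fun ds => rp.2 :: ds)

-- dfs(prefix, res, depth): fuel k = bits - depth; returns (found, stopped)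
def dfsB (J : Int) : Nat → List Char → List (List Int) → List (String × List Int) →
    (List (String × List Int) × Bool)
  | 0, pre, res, found =>
    let found' := match leafCheck (stepRes res 1) with
      | some divs => found ++ [(String.ofList (pre ++ ['1']), divs)]
      | none => found
    (found', decide (J ≤ (found'.length : Int)))
  | k + 1, pre, res, found =>
    let r0 := dfsB J k (pre ++ ['0']) (stepRes res 0) found
    if r0.2 then r0 else dfsB J k (pre ++ ['1']) (stepRes res 1) r0.1

-- init = [[1 % p for p in attempts] for b in bases]
def initRes : List (List Int) := pvBases.map (fun _ => pvAttempts.map (fun p => PySem.Int.mod 1 p))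

def solve_alt (N : Int) (J : Int) : List (String × List Int) :=
  let r := dfsB J (N - 2).toNat ['1'] initRes []
  if r.2 then r.1 else []

-- ===== PRECONDITION & SPEC =====
-- Pre excludes N < 2, where Python A raises TypeError (2 ** negative is a float, range() rejects it)
def Pre_solve (N : Int) (J : Int) : Prop := 2 ≤ N
instance (N : Int) (J : Int) : Decidable (Pre_solve N J) := by unfold Pre_solve; infer_instance
def pvWitness_solve : Int × Int := (4, 1)

-- For N=2 with J<=1 A's '{:00b}' format still prints one digit so A tests the 3-digit string '101'
-- (not a 2-digit coin) and returns [], while B tests the actual 2-digit candidate '11', a jamcoin,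
-- and returns [('11',[3,2,5,2,7,2,3,2,11])], which is the intended answer for length-2 coins.
def D_solve (N : Int) (J : Int) : Prop := N = 2 ∧ J ≤ 1
instance (N : Int) (J : Int) : Decidable (D_solve N J) := by unfold D_solve; infer_instance

def Spec_solve (N : Int) (J : Int) (out : List (String × List Int)) : Prop :=
  ¬ D_solve N J → out = solve_alt N J
instance (N : Int) (J : Int) (out : List (String × List Int)) : Decidable (Spec_solve N J out) := by
  unfold Spec_solve; infer_instance

def pvDiffWitness_solve : Int × Int := (2, 1)
def pvDiffWitnessOut_solve : (List (String × List Int)) × (List (String × List Int)) :=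
  ([], [("11", [3, 2, 5, 2, 7, 2, 3, 2, 11])])

-- ===== CLAIM (what is proved, stated in full; the proofs are below) =====
def Claim_unchanged_solve : Prop :=
  ∀ (N : Int) (J : Int), Dom_solve N J → Pre_solve N J → Spec_solve N J (solve N J)
def Claim_changed_solve : Prop :=
  Dom_solve (pvDiffWitness_solve.1) (pvDiffWitness_solve.2) ∧
  Pre_solve (pvDiffWitness_solve.1) (pvDiffWitness_solve.2) ∧
  D_solve (pvDiffWitness_solve.1) (pvDiffWitness_solve.2) ∧
  solve (pvDiffWitness_solve.1) (pvDiffWitness_solve.2) = pvDiffWitnessOut_solve.1 ∧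
  solve_alt (pvDiffWitness_solve.1) (pvDiffWitness_solve.2) = pvDiffWitnessOut_solve.2 ∧
  pvDiffWitnessOut_solve.1 ≠ pvDiffWitnessOut_solve.2
def Claim_exact_solve : Prop :=
  ∀ (N : Int) (J : Int), Dom_solve N J → Pre_solve N J → D_solve N J → solve N J ≠ solve_alt N J

-- ===== LEMMAS AND PROOFS =====

-- ---- the positional value: A's translate equals a left fold (Horner form), proof-side only ----
def hornerL (s : List Char) (base : Int) : Int :=
  s.foldl (fun num d => num * base + pvDigit d) 0

theorem horner_shift (l : List Char) (base a : Int) :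
    l.foldl (fun num d => num * base + pvDigit d) a
      = a * base ^ l.length + l.foldl (fun num d => num * base + pvDigit d) 0 := by
  induction l generalizing a with
  | nil => simp
  | cons c t ih =>
    simp only [List.foldl_cons, List.length_cons]
    rw [ih (a * base + _), ih (0 * base + _)]
    ring

theorem translate_eq_horner (coin : String) (base : Int) :
    aTranslate coin base = hornerL coin.toList base := by
  unfold aTranslate hornerL
  induction coin.toList with
  | nil => simp
  | cons c t ih =>
    rw [List.reverse_cons, PySem.List.enumerate_append, List.foldl_append]
    simp only [PySem.List.enumerate, List.foldl_cons, List.foldl_nil, List.length_reverse]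
    rw [ih, horner_shift t base (0 * base + pvDigit c)]
    simp only [zero_add, Int.toNat_natCast]
    ring

theorem hornerL_append (s : List Char) (c : Char) (base : Int) :
    hornerL (s ++ [c]) base = hornerL s base * base + pvDigit c := by
  simp [hornerL, List.foldl_append]

-- ---- modular arithmetic: one Horner step commutes with Python's mod (positive modulus) ----
theorem modStep (a b d p : Int) (hp : 0 < p) :
    PySem.Int.mod (PySem.Int.mod a p * b + d) p = PySem.Int.mod (a * b + d) p := by
  rw [PySem.Int.mod_eq_emod_of_pos hp, PySem.Int.mod_eq_emod_of_pos hp,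
      PySem.Int.mod_eq_emod_of_pos hp]
  conv_rhs => rw [← Int.emod_emod_of_dvd (a * b + d) (dvd_refl p)]
  rw [Int.emod_def a p]
  have : (a - p * (a / p)) * b + d = a * b + d + p * (-(a / p) * b) := by ring
  rw [this, Int.add_mul_emod_self_left, Int.emod_emod_of_dvd _ (dvd_refl p)]

-- ---- the residue matrix of a prefix and its invariants ----
def resOf (s : List Char) : List (List Int) :=
  pvBases.map (fun b => pvAttempts.map (fun p => PySem.Int.mod (hornerL s b) p))

theorem stepRes_resOf (s : List Char) (c : Char) :
    stepRes (resOf s) ((c.toNat : Int) - 48) = resOf (s ++ [c]) := by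
  simp only [stepRes, resOf, pvBases, pvAttempts, List.map_cons, List.map_nil,
    List.zip_cons_cons, List.zip_nil_right, List.zip_nil_left, hornerL_append, pvDigit,
    List.cons.injEq, and_true]
  and_intros <;> exact modStep _ _ _ _ (by norm_num)

theorem initRes_eq : initRes = resOf ['1'] := by
  unfold initRes resOf
  have h : ∀ b : Int, hornerL ['1'] b = 1 := by
    intro b; simp [hornerL, pvDigit]
  simp [h]

-- ---- sequencing options: the common shape of A's fold and B's leaf_check ----
def seqOpt : List (Option Int) → Option (List Int)
  | [] => some []
  | o :: t => o.bind (fun x => (seqOpt t).map (x :: ·))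

theorem leafCheck_eq (rows : List (List Int)) :
    leafCheck rows
      = seqOpt (rows.map (fun row =>
          (((row.zip pvAttempts).find? (fun rp => rp.1 == 0)).map (·.2)))) := by
  induction rows with
  | nil => rfl
  | cons row rest ih =>
    simp only [leafCheck, List.map_cons, seqOpt]
    cases h : (row.zip pvAttempts).find? (fun rp => rp.1 == 0) with
    | none => simp [h]
    | some rp => simp [h, ih]

theorem foldl_seqOpt (g : Int → Option Int) (l : List Int) (ds : List Int) :
    l.foldl (fun st x => st.bind fun d => (g x).map (fun a => d ++ [a])) (some ds)
      = (seqOpt (l.map g)).map (ds ++ ·) := by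
  induction l generalizing ds with
  | nil => simp [seqOpt]
  | cons x t ih =>
    simp only [List.foldl_cons, Option.bind_some, List.map_cons, seqOpt]
    cases hg : g x with
    | none =>
      have hnone : ∀ (m : List Int),
          m.foldl (fun st x => st.bind fun d => (g x).map (fun a => d ++ [a]))
            (none : Option (List Int)) = none := by
        intro m; induction m with
        | nil => rfl
        | cons y u ihu => simpa using ihu
      simp [hnone]
    | some a =>
      simp only [Option.map_some]
      rw [ih (ds ++ [a])]
      cases seqOpt (t.map g) <;> simp

theorem findDivisors_eq (coin : String) :
    findDivisors coin
      = seqOpt (pvBases.map (fun b =>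
          pvAttempts.find? (fun p => PySem.Int.mod (aTranslate coin b) p == 0))) := by
  unfold findDivisors
  have hr : PySem.List.pyRange 2 11 1 = pvBases := by decide
  rw [hr, foldl_seqOpt]
  cases seqOpt _ <;> simp

theorem zipmap_find (f : Int → Int) (q : Int → Bool) (l : List Int) :
    (((l.map f).zip l).find? (fun rp => q rp.1)).map (·.2)
      = l.find? (fun p => q (f p)) := by
  induction l with
  | nil => rfl
  | cons a t ih =>
    simp only [List.map_cons, List.zip_cons_cons, List.find?_cons]
    cases hq : q (f a) with
    | true => simp [hq]
    | false => simpa [hq] using ih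

theorem leafCheck_resOf (s : List Char) :
    leafCheck (resOf s) = findDivisors (String.ofList s) := by
  rw [leafCheck_eq, findDivisors_eq]
  congr 1
  unfold resOf
  rw [List.map_map]
  refine List.map_congr_left ?_
  intro b _
  have := zipmap_find (fun p => PySem.Int.mod (hornerL s b) p) (fun r => r == 0) pvAttempts
  simp only [Function.comp_apply]
  rw [this]
  have ht : aTranslate (String.ofList s) b = hornerL s b := by
    rw [translate_eq_horner]; simp
  simp [ht]

-- ---- the generic early-stopping loop over a list of candidate coins ----
def processA (J : Int) : List String → List (String × List Int) →
    (List (String × List Int) × Bool)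
  | [], acc => (acc, false)
  | c :: cs, acc =>
    let acc' := match findDivisors c with
      | some d => acc ++ [(c, d)]
      | none => acc
    if J ≤ (acc'.length : Int) then (acc', true) else processA J cs acc'

theorem processA_append (J : Int) (l1 l2 : List String) (acc : List (String × List Int)) :
    processA J (l1 ++ l2) acc
      = if (processA J l1 acc).2 then processA J l1 acc else processA J l2 (processA J l1 acc).1 := by
  induction l1 generalizing acc with
  | nil => simp [processA]
  | cons c cs ih =>
    simp only [List.cons_append, processA]
    split <;> split_ifs <;> simp_all [ih]

-- ---- A's loop is the generic loop over its coin list ----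
def coinsA (bits : Nat) : Nat → Nat → List String
  | _, 0 => []
  | b, r + 1 => String.ofList ('1' :: pvBinPad bits b ++ ['1']) :: coinsA bits (b + 1) r

theorem coinsA_append (bits : Nat) (r1 : Nat) :
    ∀ (b r2 : Nat), coinsA bits b (r1 + r2) = coinsA bits b r1 ++ coinsA bits (b + r1) r2 := by
  induction r1 with
  | zero => intro b r2; simp [coinsA]
  | succ r ih =>
    intro b r2
    have h : r + 1 + r2 = (r + r2) + 1 := by omega
    rw [h]
    simp only [coinsA, ih (b + 1) r2, List.cons_append]
    rw [show b + 1 + r = b + (r + 1) by omega]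

theorem solveLoop_eq (bits : Nat) (J : Int) :
    ∀ (r b : Nat) (acc : List (String × List Int)),
      solveLoop bits J r b acc
        = (if (processA J (coinsA bits b r) acc).2 then (processA J (coinsA bits b r) acc).1
           else []) := by
  intro r
  induction r with
  | zero => intro b acc; simp [solveLoop, coinsA, processA]
  | succ rest ih =>
    intro b acc
    simp only [solveLoop, coinsA, processA]
    split <;> split_ifs <;> simp_all [ih]

-- ---- zero-padded binary: the nice MSB-first recursion and its match with pvBinPad ----
def padBits : Nat → Nat → List Char
  | 0, _ => []
  | k + 1, b => (if b / 2 ^ k % 2 = 1 then '1' else '0') :: padBits k b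

theorem padBits_snoc (k : Nat) : ∀ b : Nat,
    padBits (k + 1) b = padBits k (b / 2) ++ [if b % 2 = 1 then '1' else '0'] := by
  induction k with
  | zero => intro b; simp [padBits]
  | succ k ih =>
    intro b
    show (if b / 2 ^ (k + 1) % 2 = 1 then '1' else '0') :: padBits (k + 1) b = _
    rw [ih b]
    show _ = (if (b / 2) / 2 ^ k % 2 = 1 then '1' else '0') :: (padBits k (b / 2) ++ _)
    have : b / 2 / 2 ^ k = b / 2 ^ (k + 1) := by
      rw [Nat.div_div_eq_div_mul, pow_succ, mul_comm 2 (2 ^ k), ← pow_succ]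
    rw [this]

theorem pad_extend (j : Nat) : ∀ (k b : Nat), b < 2 ^ k →
    List.replicate j '0' ++ padBits k b = padBits (j + k) b := by
  induction j with
  | zero => intro k b _; simp
  | succ j ih =>
    intro k b hb
    have hd : b / 2 ^ (j + k) = 0 := Nat.div_eq_of_lt (lt_of_lt_of_le hb (Nat.pow_le_pow_right (by norm_num) (by omega)))
    have : j + 1 + k = (j + k) + 1 := by omega
    rw [this]
    show List.replicate (j + 1) '0' ++ padBits k b = (if b / 2 ^ (j + k) % 2 = 1 then '1' else '0') :: padBits (j + k) b
    rw [hd, List.replicate_succ]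
    simp [ih k b hb]

theorem binCore_spec : ∀ b : Nat, 1 ≤ b →
    binCore b = padBits (binCore b).length b
      ∧ b < 2 ^ (binCore b).length ∧ 2 ^ ((binCore b).length - 1) ≤ b := by
  intro b
  induction b using Nat.strong_induction_on with
  | _ b ih =>
    intro hb
    obtain rfl | hb2 : b = 1 ∨ 2 ≤ b := by omega
    · exact ⟨by norm_num [binCore, padBits], by norm_num [binCore], by norm_num [binCore]⟩
    · obtain ⟨n, rfl⟩ : ∃ n, b = n + 1 := ⟨b - 1, by omega⟩
      have hhalf : 1 ≤ (n + 1) / 2 := by omega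
      have hlt : (n + 1) / 2 < n + 1 := Nat.div_lt_self (by omega) one_lt_two
      obtain ⟨h1, h2, h3⟩ := ih ((n + 1) / 2) hlt hhalf
      have hL : 1 ≤ (binCore ((n + 1) / 2)).length := by
        by_contra h
        have h0 : (binCore ((n + 1) / 2)).length = 0 := by omega
        rw [h0] at h2; omega
      have hb2eq : binCore (n + 1)
          = binCore ((n + 1) / 2) ++ [if (n + 1) % 2 = 1 then '1' else '0'] := by
        rw [binCore]
      have hlen : (binCore (n + 1)).length = (binCore ((n + 1) / 2)).length + 1 := by
        rw [hb2eq]; simp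
      refine ⟨?_, ?_, ?_⟩
      · rw [hlen, hb2eq, padBits_snoc, ← h1]
      · rw [hlen, pow_succ]; omega
      · rw [hlen]
        simp only [Nat.add_sub_cancel]
        calc 2 ^ (binCore ((n + 1) / 2)).length
            = 2 ^ ((binCore ((n + 1) / 2)).length - 1) * 2 := by
              rw [← pow_succ]; congr 1; omega
          _ ≤ ((n + 1) / 2) * 2 := Nat.mul_le_mul_right 2 h3
          _ ≤ n + 1 := by omega

theorem pvBinPad_eq_padBits (k b : Nat) (hk : 1 ≤ k) (hb : b < 2 ^ k) :
    pvBinPad k b = padBits k b := by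
  unfold pvBinPad
  by_cases h0 : b = 0
  · subst h0
    simp only [if_pos rfl]
    have h1 : padBits 1 0 = ['0'] := by simp [padBits]
    have := pad_extend (k - 1) 1 0 (by norm_num)
    rw [h1] at this
    have hk1 : k - 1 + 1 = k := by omega
    rw [hk1] at this
    simpa using this
  · simp only [if_neg h0]
    obtain ⟨h1, h2, h3⟩ := binCore_spec b (by omega)
    have hLk : (binCore b).length ≤ k := by
      by_contra h
      have : k ≤ (binCore b).length - 1 := by omega
      have := Nat.pow_le_pow_right (show 1 ≤ 2 by norm_num) this
      omega
    have := pad_extend (k - (binCore b).length) (binCore b).length b h2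
    rw [← h1] at this
    have hk1 : k - (binCore b).length + (binCore b).length = k := by omega
    rw [hk1] at this
    exact this

-- ---- B's DFS leaves, in order, are A's coins ----
def leavesB : List Char → Nat → List String
  | s, 0 => [String.ofList (s ++ ['1'])]
  | s, k + 1 => leavesB (s ++ ['0']) k ++ leavesB (s ++ ['1']) k

theorem padBits_append_bit (m b : Nat) (d : Nat) (hd : d < 2) :
    padBits (m + 1) (2 * b + d) = padBits m b ++ [if d = 1 then '1' else '0'] := by
  rw [padBits_snoc]
  have h1 : (2 * b + d) / 2 = b := by omega
  have h2 : (2 * b + d) % 2 = d := by omega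
  rw [h1, h2]

theorem leavesB_coinsA (k : Nat) : ∀ (m b : Nat), 1 ≤ m + k → b < 2 ^ m →
    leavesB ('1' :: padBits m b) k = coinsA (m + k) (b * 2 ^ k) (2 ^ k) := by
  induction k with
  | zero =>
    intro m b hm hb
    simp only [leavesB, pow_zero, mul_one, Nat.add_zero]
    show _ = String.ofList ('1' :: pvBinPad m b ++ ['1']) :: coinsA m (b + 1) 0
    rw [pvBinPad_eq_padBits m b (by omega) hb]
    rfl
  | succ k ih =>
    intro m b hm hb
    show leavesB ('1' :: padBits m b ++ ['0']) k ++ leavesB ('1' :: padBits m b ++ ['1']) k = _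
    have e0 : ('1' :: padBits m b) ++ ['0'] = '1' :: padBits (m + 1) (2 * b) := by
      have := padBits_append_bit m b 0 (by norm_num)
      simp only [Nat.add_zero] at this
      rw [this]; simp
    have e1 : ('1' :: padBits m b) ++ ['1'] = '1' :: padBits (m + 1) (2 * b + 1) := by
      rw [padBits_append_bit m b 1 (by norm_num)]; simp
    have hb0 : 2 * b < 2 ^ (m + 1) := by rw [pow_succ]; omega
    have hb1 : 2 * b + 1 < 2 ^ (m + 1) := by rw [pow_succ]; omega
    rw [show ('1' :: padBits m b ++ ['0']) = ('1' :: padBits m b) ++ ['0'] by simp, e0,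
        show ('1' :: padBits m b ++ ['1']) = ('1' :: padBits m b) ++ ['1'] by simp, e1,
        ih (m + 1) (2 * b) (by omega) hb0, ih (m + 1) (2 * b + 1) (by omega) hb1]
    have hc := coinsA_append (m + 1 + k) (2 ^ k) (2 * b * 2 ^ k) (2 ^ k)
    have h1 : 2 * b * 2 ^ k + 2 ^ k = (2 * b + 1) * 2 ^ k := by ring
    rw [h1] at hc
    rw [← hc]
    have h2 : m + 1 + k = m + (k + 1) := by omega
    have h3 : 2 * b * 2 ^ k = b * 2 ^ (k + 1) := by rw [pow_succ]; ring
    have h4 : (2 ^ k + 2 ^ k : Nat) = 2 ^ (k + 1) := by rw [pow_succ]; omega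
    rw [h2, h3, h4]

-- ---- B's DFS is the generic loop over its leaves ----
theorem dfsB_eq (J : Int) (k : Nat) : ∀ (s : List Char) (found : List (String × List Int)),
    dfsB J k s (resOf s) found = processA J (leavesB s k) found := by
  induction k with
  | zero =>
    intro s found
    have h1 : stepRes (resOf s) 1 = resOf (s ++ ['1']) := by
      have h := stepRes_resOf s '1'
      norm_num at h
      exact h
    simp only [dfsB, leavesB, processA]
    rw [h1, leafCheck_resOf]
    cases hf : findDivisors (String.ofList (s ++ ['1'])) with
    | none =>
      by_cases hJ : J ≤ ((found.length : Nat) : Int)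
      · simp [hJ]
      · simp [hJ, processA]
    | some d =>
      by_cases hJ : J ≤ (found.length : Int) + 1
      · simp [hJ]
      · simp [hJ, processA]
  | succ k ih =>
    intro s found
    have h0 : stepRes (resOf s) 0 = resOf (s ++ ['0']) := by
      have h := stepRes_resOf s '0'
      norm_num at h
      exact h
    have h1 : stepRes (resOf s) 1 = resOf (s ++ ['1']) := by
      have h := stepRes_resOf s '1'
      norm_num at h
      exact h
    simp only [dfsB, leavesB]
    rw [h0, h1, ih (s ++ ['0']) found, processA_append]
    split
    · rfl
    · exact ih (s ++ ['1']) _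

-- ---- assembling both sides for N ≥ 3 ----
theorem main_ge3 (N J : Int) (hN : 3 ≤ N) : solve N J = solve_alt N J := by
  have hbits : 1 ≤ (N - 2).toNat := by omega
  unfold solve solve_alt
  rw [solveLoop_eq, initRes_eq, dfsB_eq]
  have hl := leavesB_coinsA (N - 2).toNat 0 0 (by omega) (by norm_num)
  simp only [padBits, Nat.zero_add, Nat.zero_mul] at hl
  rw [hl]

-- ---- the N = 2 cases ----
theorem findDivisors_101 : findDivisors (String.ofList ['1', '0', '1']) = none := by decide

theorem leafCheck_11 :
    leafCheck (stepRes initRes 1) = some [3, 2, 5, 2, 7, 2, 3, 2, 11] := by decide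

theorem solve_two (J : Int) : solve 2 J = [] := by
  have h : ((2 : Int) - 2).toNat = 0 := by norm_num
  unfold solve
  rw [h]
  show solveLoop 0 J 1 0 [] = []
  simp only [solveLoop]
  have hp : pvBinPad 0 0 = ['0'] := by simp [pvBinPad]
  rw [hp]
  rw [show (['1', '0'] ++ ['1'] : List Char) = ['1', '0', '1'] from rfl, findDivisors_101]
  rw [show (match (none : Option (List Int)) with
      | some divisors => [] ++ [(String.ofList ['1', '0', '1'], divisors)]
      | none => ([] : List (String × List Int))) = [] from rfl]
  split
  · rfl
  · rfl

theorem solve_alt_two_le_one (J : Int) (hJ : J ≤ 1) :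
    solve_alt 2 J = [("11", [3, 2, 5, 2, 7, 2, 3, 2, 11])] := by
  show (let r := dfsB J 0 ['1'] initRes []
        if r.2 then r.1 else []) = _
  show (let r := (let found' := match leafCheck (stepRes initRes 1) with
          | some divs => [] ++ [(String.ofList (['1'] ++ ['1']), divs)]
          | none => ([] : List (String × List Int))
        (found', decide (J ≤ (found'.length : Int))))
        if r.2 then r.1 else []) = _
  rw [leafCheck_11]
  simp only [List.nil_append, List.singleton_append, List.length_cons, List.length_nil]
  have hd : J ≤ ((0 + 1 : Nat) : Int) := by push_cast; omega
  simp only [decide_eq_true_eq]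
  rw [if_pos hd]

theorem solve_alt_two_ge_two (J : Int) (hJ : 2 ≤ J) : solve_alt 2 J = [] := by
  show (let r := dfsB J 0 ['1'] initRes []
        if r.2 then r.1 else []) = _
  show (let r := (let found' := match leafCheck (stepRes initRes 1) with
          | some divs => [] ++ [(String.ofList (['1'] ++ ['1']), divs)]
          | none => ([] : List (String × List Int))
        (found', decide (J ≤ (found'.length : Int))))
        if r.2 then r.1 else []) = _
  rw [leafCheck_11]
  simp only [List.nil_append, List.singleton_append, List.length_cons, List.length_nil]
  have hd : ¬ J ≤ ((0 + 1 : Nat) : Int) := by push_cast; omega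
  simp only [decide_eq_true_eq]
  rw [if_neg hd]

-- ===== VERDICT (by name: the statements are the Claim_ definitions above) =====
theorem solve_spec : Claim_unchanged_solve := by
  intro N J _ hPre
  unfold Spec_solve
  intro hnD
  unfold Pre_solve at hPre
  by_cases h2 : N = 2
  · subst h2
    have hJ : 2 ≤ J := by
      unfold D_solve at hnD
      push_neg at hnD
      have := hnD rfl
      omega
    rw [solve_two, solve_alt_two_ge_two J hJ]
  · exact main_ge3 N J (by omega)

theorem solve_changed : Claim_changed_solve := by
  unfold Claim_changed_solve; decide

theorem solve_tight : Claim_exact_solve := by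
  intro N J _ _ hD
  obtain ⟨h2, hJ⟩ := hD
  subst h2
  rw [solve_two, solve_alt_two_le_one J hJ]
  simp
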